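-- pv_equiv track=rewrite | github.com/chipaaco/hustle | main.py | print_aura
-- ===== SOURCE A (Python) =====
-- def print_aura(aura):
--     bar = []
--     for i in range(0, 6):
--         if aura > 0:
--             bar.append("1")
--             aura -= 1
--         else:
--             bar.append(" ")
--     return(bar)
-- ===== SOURCE B (Python) =====
-- def print_aura(aura):
--     n = max(0, min(aura, 6))
--     return ["1"] * n + [" "] * (6 - n)
-- ===== Notes on version B (the rewrite author's own statement) =====
-- stated objective: simpler
-- what changed: Replaces the six-step loop with decrementing counter by a closed-form clamped count n = max(0, min(aura, 6)) and builds the bar by list repetition.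
import Mathlib
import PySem

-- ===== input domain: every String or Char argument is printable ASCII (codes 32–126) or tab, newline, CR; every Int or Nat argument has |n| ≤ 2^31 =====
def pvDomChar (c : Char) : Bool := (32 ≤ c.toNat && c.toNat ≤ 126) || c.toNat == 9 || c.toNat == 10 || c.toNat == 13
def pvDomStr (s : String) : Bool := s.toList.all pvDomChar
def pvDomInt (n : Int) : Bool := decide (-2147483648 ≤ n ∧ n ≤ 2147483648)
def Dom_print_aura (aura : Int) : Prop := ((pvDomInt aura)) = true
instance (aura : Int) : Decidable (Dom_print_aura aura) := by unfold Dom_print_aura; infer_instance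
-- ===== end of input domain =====

-- B replaces A's six-iteration decrement loop by a closed-form clamped count and list repetition (simpler).

-- ===== PORT A =====
-- bar = []; for i in range(0,6): if aura > 0: bar.append("1"); aura -= 1 else: bar.append(" "); return bar
def print_aura (aura : Int) : List String :=
  (PySem.List.pyRange 0 6 1).foldl
    (fun (st : List String × Int) _ =>
      if st.2 > 0 then (st.1 ++ ["1"], st.2 - 1) else (st.1 ++ [" "], st.2))
    ([], aura) |>.1

-- ===== PORT B =====
-- n = max(0, min(aura, 6)); return ["1"]*n + [" "]*(6-n)
def print_aura_alt (aura : Int) : List String :=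
  let n : Int := max 0 (min aura 6)
  List.replicate n.toNat "1" ++ List.replicate (6 - n).toNat " "

-- ===== PRECONDITION & SPEC =====
def Spec_print_aura (aura : Int) (out : List String) : Prop := out = print_aura_alt aura
instance (aura : Int) (out : List String) : Decidable (Spec_print_aura aura out) := by unfold Spec_print_aura; infer_instance

-- ===== CLAIM (what is proved, stated in full; the proofs are below) =====
def Claim_equal_print_aura : Prop := ∀ (aura : Int), Dom_print_aura aura → Spec_print_aura aura (print_aura aura)

-- ===== LEMMAS AND PROOFS =====

-- Loop invariant: folding A's body over any index list of length k appends
-- min(max a 0, k) ones followed by trailing blanks.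
theorem print_aura_loop_inv (l : List Int) (acc : List String) (a : Int) :
    (l.foldl (fun (st : List String × Int) _ =>
        if st.2 > 0 then (st.1 ++ ["1"], st.2 - 1) else (st.1 ++ [" "], st.2)) (acc, a)).1
      = acc ++ List.replicate (min (max a 0) l.length).toNat "1"
            ++ List.replicate (l.length - (min (max a 0) l.length).toNat) " " := by
  induction l generalizing acc a with
  | nil => simp
  | cons x xs ih =>
    simp only [List.foldl_cons, List.length_cons]
    push_cast
    by_cases h : a > 0
    · rw [if_pos h, ih]
      have h1 : (min (max a 0) (↑xs.length + 1)).toNat = (min (max (a-1) 0) ↑xs.length).toNat + 1 := by omega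
      rw [h1]
      have h2 : xs.length + 1 - ((min (max (a-1) 0) ↑xs.length).toNat + 1)
              = xs.length - (min (max (a-1) 0) ↑xs.length).toNat := by omega
      rw [h2, List.replicate_succ]
      simp
    · rw [if_neg h, ih]
      have h1 : (min (max a 0) (↑xs.length + 1)).toNat = 0 := by omega
      have h0 : (min (max a 0) ↑xs.length).toNat = 0 := by omega
      rw [h1, h0]
      simp [List.replicate_succ]

theorem print_aura_eq (aura : Int) : print_aura aura = print_aura_alt aura := by
  simp only [print_aura, print_aura_alt,
    show PySem.List.pyRange 0 6 1 = [0,1,2,3,4,5] from by decide]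
  rw [print_aura_loop_inv]
  simp only [List.length_cons, List.length_nil, List.nil_append]
  push_cast
  congr 1
  · congr 1
    omega
  · congr 1
    omega

-- ===== VERDICT (by name: the statement is the Claim_ definition above) =====
theorem print_aura_spec : Claim_equal_print_aura := by
  intro aura _
  exact print_aura_eq aura
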